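-- pv_equiv track=rewrite | github.com/Dkostoski30/Vestacka-Inteligencija | Laboratoriski-Vezbi/Lab ConstraintSatisfaction/Zadaca2.py | max_4_po_termin
-- ===== SOURCE A (Python) =====
-- def max_4_po_termin(paper1, paper2, paper3, paper4, paper5, paper6, paper7, paper8, paper9, paper10):
--     variables = [paper1, paper2, paper3, paper4, paper5, paper6, paper7, paper8, paper9, paper10]
--     count_T1 = 0
--     count_T2 = 0
--     count_T3 = 0
--     count_T4 = 0
--
--     for variable in variables:
--         if "T1" in variable:
--             count_T1 += 1
--         if "T2" in variable:
--             count_T2 += 1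
--         if "T3" in variable:
--             count_T3 += 1
--         if "T4" in variable:
--             count_T4 += 1
--     return count_T1 <= 4 and count_T2 <= 4 and count_T3 <= 4 and count_T4 <= 4
-- ===== SOURCE B (Python) =====
-- def max_4_po_termin(paper1, paper2, paper3, paper4, paper5, paper6, paper7, paper8, paper9, paper10):
--     # Recursive budget-countdown: each term starts with a budget of 4; a hit on an
--     # exhausted budget short-circuits to False; reaching the end means True.
--     def go(vs, b1, b2, b3, b4):
--         if not vs:
--             return True
--         v = vs[0]
--         if "T1" in v:
--             if b1 == 0:
--                 return False
--             b1 -= 1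
--         if "T2" in v:
--             if b2 == 0:
--                 return False
--             b2 -= 1
--         if "T3" in v:
--             if b3 == 0:
--                 return False
--             b3 -= 1
--         if "T4" in v:
--             if b4 == 0:
--                 return False
--             b4 -= 1
--         return go(vs[1:], b1, b2, b3, b4)
--     return go([paper1, paper2, paper3, paper4, paper5, paper6, paper7, paper8, paper9, paper10], 4, 4, 4, 4)
-- ===== Notes on version B (the rewrite author's own statement) =====
-- stated objective: alternative
-- what changed: Replaces A's count-all-then-compare single pass (four counters compared to 4 at the end) by a recursive budget-countdown that starts each term at 4, decrements on hits, and short-circuits to False the moment an exhausted budget is hit again, so no final comparison is performed.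
import Mathlib
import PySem

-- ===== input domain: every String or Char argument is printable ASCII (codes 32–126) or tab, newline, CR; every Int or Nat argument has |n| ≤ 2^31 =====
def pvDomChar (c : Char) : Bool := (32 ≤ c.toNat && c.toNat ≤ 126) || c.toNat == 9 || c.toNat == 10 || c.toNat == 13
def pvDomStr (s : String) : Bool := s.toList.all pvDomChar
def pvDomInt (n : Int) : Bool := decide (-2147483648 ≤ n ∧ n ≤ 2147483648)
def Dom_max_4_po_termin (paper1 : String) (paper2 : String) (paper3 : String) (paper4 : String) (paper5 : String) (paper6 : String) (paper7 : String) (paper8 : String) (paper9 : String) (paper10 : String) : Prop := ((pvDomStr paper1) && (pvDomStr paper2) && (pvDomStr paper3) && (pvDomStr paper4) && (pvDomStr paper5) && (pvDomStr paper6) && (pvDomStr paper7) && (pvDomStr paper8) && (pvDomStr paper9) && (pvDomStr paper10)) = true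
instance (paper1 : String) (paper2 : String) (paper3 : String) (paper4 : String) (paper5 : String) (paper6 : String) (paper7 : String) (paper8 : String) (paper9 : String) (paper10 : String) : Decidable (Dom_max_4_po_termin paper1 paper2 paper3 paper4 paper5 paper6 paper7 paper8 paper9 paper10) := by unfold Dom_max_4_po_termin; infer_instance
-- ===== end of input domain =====

-- B replaces A's count-then-compare pass by a recursive budget-countdown with early exit (alternative decomposition; same cost).


-- ===== PORT A =====
-- Port of A: one pass over the variables maintaining four counters, compared to 4 at the end.
def max_4_po_termin (paper1 : String) (paper2 : String) (paper3 : String) (paper4 : String) (paper5 : String) (paper6 : String) (paper7 : String) (paper8 : String) (paper9 : String) (paper10 : String) : Bool :=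
  let vs := [paper1, paper2, paper3, paper4, paper5, paper6, paper7, paper8, paper9, paper10]
  let s := vs.foldl (fun (s : Int × Int × Int × Int) v =>
      let s1 := if PySem.Str.isIn "T1" v then s.1 + 1 else s.1
      let s2 := if PySem.Str.isIn "T2" v then s.2.1 + 1 else s.2.1
      let s3 := if PySem.Str.isIn "T3" v then s.2.2.1 + 1 else s.2.2.1
      let s4 := if PySem.Str.isIn "T4" v then s.2.2.2 + 1 else s.2.2.2
      (s1, s2, s3, s4)) (0, 0, 0, 0)
  s.1 ≤ 4 && s.2.1 ≤ 4 && s.2.2.1 ≤ 4 && s.2.2.2 ≤ 4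

-- ===== PORT B =====
-- Port of B's helper 'go': recursive budget-countdown, early False when an exhausted budget is hit.
def pvAltGo : List String → Int → Int → Int → Int → Bool
  | [], _, _, _, _ => true
  | v :: rest, b1, b2, b3, b4 =>
    if PySem.Str.isIn "T1" v && b1 == 0 then false
    else
      let b1 := if PySem.Str.isIn "T1" v then b1 - 1 else b1
      if PySem.Str.isIn "T2" v && b2 == 0 then false
      else
        let b2 := if PySem.Str.isIn "T2" v then b2 - 1 else b2
        if PySem.Str.isIn "T3" v && b3 == 0 then false
        else
          let b3 := if PySem.Str.isIn "T3" v then b3 - 1 else b3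
          if PySem.Str.isIn "T4" v && b4 == 0 then false
          else
            let b4 := if PySem.Str.isIn "T4" v then b4 - 1 else b4
            pvAltGo rest b1 b2 b3 b4

def max_4_po_termin_alt (paper1 : String) (paper2 : String) (paper3 : String) (paper4 : String) (paper5 : String) (paper6 : String) (paper7 : String) (paper8 : String) (paper9 : String) (paper10 : String) : Bool :=
  pvAltGo [paper1, paper2, paper3, paper4, paper5, paper6, paper7, paper8, paper9, paper10] 4 4 4 4

-- ===== PRECONDITION & SPEC =====
def Spec_max_4_po_termin (paper1 : String) (paper2 : String) (paper3 : String) (paper4 : String) (paper5 : String) (paper6 : String) (paper7 : String) (paper8 : String) (paper9 : String) (paper10 : String) (out : Bool) : Prop := out = max_4_po_termin_alt paper1 paper2 paper3 paper4 paper5 paper6 paper7 paper8 paper9 paper10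
instance (paper1 : String) (paper2 : String) (paper3 : String) (paper4 : String) (paper5 : String) (paper6 : String) (paper7 : String) (paper8 : String) (paper9 : String) (paper10 : String) (out : Bool) : Decidable (Spec_max_4_po_termin paper1 paper2 paper3 paper4 paper5 paper6 paper7 paper8 paper9 paper10 out) := by unfold Spec_max_4_po_termin; infer_instance

-- ===== CLAIM (what is proved, stated in full; the proofs are below) =====
def Claim_equal_max_4_po_termin : Prop := ∀ (paper1 : String) (paper2 : String) (paper3 : String) (paper4 : String) (paper5 : String) (paper6 : String) (paper7 : String) (paper8 : String) (paper9 : String) (paper10 : String), Dom_max_4_po_termin paper1 paper2 paper3 paper4 paper5 paper6 paper7 paper8 paper9 paper10 → Spec_max_4_po_termin paper1 paper2 paper3 paper4 paper5 paper6 paper7 paper8 paper9 paper10 (max_4_po_termin paper1 paper2 paper3 paper4 paper5 paper6 paper7 paper8 paper9 paper10)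

-- ===== LEMMAS AND PROOFS =====
-- 0/1 membership count of a term over a list of strings (proof-side characterisation).
def pvCnt (t : String) (l : List String) : Int :=
  (l.map (fun v => if PySem.Str.isIn t v then (1 : Int) else 0)).sum

-- A's loop computes, in each component, the membership count.
theorem loopA_eq (l : List String) (a b c d : Int) :
    l.foldl (fun (s : Int × Int × Int × Int) v =>
      let s1 := if PySem.Str.isIn "T1" v then s.1 + 1 else s.1
      let s2 := if PySem.Str.isIn "T2" v then s.2.1 + 1 else s.2.1
      let s3 := if PySem.Str.isIn "T3" v then s.2.2.1 + 1 else s.2.2.1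
      let s4 := if PySem.Str.isIn "T4" v then s.2.2.2 + 1 else s.2.2.2
      (s1, s2, s3, s4)) (a, b, c, d)
    = (a + pvCnt "T1" l, b + pvCnt "T2" l, c + pvCnt "T3" l, d + pvCnt "T4" l) := by
  induction l generalizing a b c d with
  | nil => simp [pvCnt]
  | cons x xs ih =>
    simp only [List.foldl_cons, pvCnt, List.map_cons, List.sum_cons, ih, Prod.mk.injEq]
    refine ⟨?_, ?_, ?_, ?_⟩ <;> split_ifs <;> ring

theorem cnt_nonneg (t : String) (l : List String) : 0 ≤ pvCnt t l := by
  unfold pvCnt; apply List.sum_nonneg; intro x hx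
  simp only [List.mem_map] at hx; obtain ⟨y, _, rfl⟩ := hx; split_ifs <;> norm_num

-- B's countdown with nonnegative budgets decides "each count ≤ its budget".
theorem pvAltGo_eq (l : List String) (b1 b2 b3 b4 : Int)
    (h1 : 0 ≤ b1) (h2 : 0 ≤ b2) (h3 : 0 ≤ b3) (h4 : 0 ≤ b4) :
    pvAltGo l b1 b2 b3 b4 =
      (decide (pvCnt "T1" l ≤ b1) && decide (pvCnt "T2" l ≤ b2) &&
       decide (pvCnt "T3" l ≤ b3) && decide (pvCnt "T4" l ≤ b4)) := by
  induction l generalizing b1 b2 b3 b4 with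
  | nil =>
    simp [pvAltGo, pvCnt]
    omega
  | cons v rest ih =>
    have hc1 := cnt_nonneg "T1" rest
    have hc2 := cnt_nonneg "T2" rest
    have hc3 := cnt_nonneg "T3" rest
    have hc4 := cnt_nonneg "T4" rest
    simp only [pvAltGo, pvCnt, List.map_cons, List.sum_cons] at *
    rcases Bool.eq_false_or_eq_true (PySem.Str.isIn "T1" v) with e1 | e1 <;>
      rcases Bool.eq_false_or_eq_true (PySem.Str.isIn "T2" v) with e2 | e2 <;>
        rcases Bool.eq_false_or_eq_true (PySem.Str.isIn "T3" v) with e3 | e3 <;>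
          rcases Bool.eq_false_or_eq_true (PySem.Str.isIn "T4" v) with e4 | e4 <;>
            simp only [e1, e2, e3, e4, Bool.true_and, Bool.false_and, Bool.false_eq_true, if_true, if_false] <;>
            (try split_ifs) <;>
            (try simp only [beq_iff_eq] at *) <;>
            first
              | (rw [ih _ _ _ _ (by omega) (by omega) (by omega) (by omega)]
                 rw [Bool.eq_iff_iff]
                 simp only [Bool.and_eq_true, decide_eq_true_eq]
                 omega)
              | (symm; simp only [Bool.and_eq_false_iff, decide_eq_false_iff_not, not_le]; omega)

theorem max_4_po_termin_spec : Claim_equal_max_4_po_termin := by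
  intro p1 p2 p3 p4 p5 p6 p7 p8 p9 p10 _
  unfold Spec_max_4_po_termin max_4_po_termin max_4_po_termin_alt
  simp only [loopA_eq, zero_add]
  rw [pvAltGo_eq _ _ _ _ _ (by norm_num) (by norm_num) (by norm_num) (by norm_num)]
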